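-- pv_equiv track=rewrite | github.com/schubb2003/element | get_vol_primary_service_id_v2.py | get_slice_counts
-- ===== SOURCE A (Python) =====
-- def get_slice_counts(out_dict):
--     """
--     Add up the slice count per service id
--     """
--     slice_dict = {}
--     my_list = []
--     for val in out_dict.values():
--         my_list.append(val[2])
--     for primary in my_list:
--         slice_count = 0
--         for val in out_dict.values():
--             if str(primary) == str(val[2]):
--                 slice_count = slice_count + 1
--         slice_dict[primary] = slice_count
--     hdr1 = "Primary ID"
--     hdr2 = "Slice count"
--     return hdr1, hdr2, slice_dict
-- ===== SOURCE B (Python) =====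
-- def get_slice_counts(out_dict):
--     """
--     Add up the slice count per service id
--     """
--     my_list = [val[2] for val in out_dict.values()]
--     counts = {}
--     for v in my_list:
--         counts[v] = counts.get(v, 0) + 1
--     slice_dict = {v: counts[v] for v in my_list}
--     return "Primary ID", "Slice count", slice_dict
-- ===== Notes on version B (the rewrite author's own statement) =====
-- stated objective: faster
-- what changed: Replaces A's nested rescans (for every extracted id, re-scan all values comparing str() forms) with a single counting pass building a frequency dictionary, then one lookup per id; the str() comparison disappears because the ids are ints, on which str-equality is equality.
import Mathlib
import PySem

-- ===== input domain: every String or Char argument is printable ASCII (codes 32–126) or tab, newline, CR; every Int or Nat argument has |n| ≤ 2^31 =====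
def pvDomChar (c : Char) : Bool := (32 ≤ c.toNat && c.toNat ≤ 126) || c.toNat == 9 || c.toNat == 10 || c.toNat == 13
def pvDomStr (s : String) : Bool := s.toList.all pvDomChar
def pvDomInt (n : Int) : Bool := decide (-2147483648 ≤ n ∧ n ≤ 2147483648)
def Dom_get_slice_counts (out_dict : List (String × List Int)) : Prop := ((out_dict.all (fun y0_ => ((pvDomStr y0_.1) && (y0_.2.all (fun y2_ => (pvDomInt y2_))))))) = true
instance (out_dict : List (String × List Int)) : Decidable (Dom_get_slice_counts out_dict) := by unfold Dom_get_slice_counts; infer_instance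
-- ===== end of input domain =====

-- B replaces A's quadratic nested rescans with one counting pass (a frequency dict) and one lookup per id.

-- ===== PORT A =====
-- val[2] is PySem.List.pyGetD val 2 0: under Pre_ every value list has length ≥ 3, so the
-- default 0 is never taken and this is exactly Python's val[2] (A raises IndexError otherwise).
def get_slice_counts (out_dict : List (String × List Int)) : String × String × (List (Int × Int)) :=
  let d := PySem.Dict.ofList out_dict
  let my_list := d.values.foldl (fun acc val => acc ++ [PySem.List.pyGetD val 2 0]) []
  let slice_dict := my_list.foldl (fun sd primary =>
      let slice_count := d.values.foldl (fun c val =>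
        if PySem.Int.toStr primary == PySem.Int.toStr (PySem.List.pyGetD val 2 0) then c + 1 else c) (0 : Int)
      sd.insert primary slice_count) (PySem.Dict.empty)
  ("Primary ID", "Slice count", slice_dict.items)

-- ===== PORT B =====
def get_slice_counts_alt (out_dict : List (String × List Int)) : String × String × (List (Int × Int)) :=
  let d := PySem.Dict.ofList out_dict
  let my_list := d.values.map (fun val => PySem.List.pyGetD val 2 0)
  let counts := my_list.foldl (fun c v => c.insert v (c.getD v 0 + 1)) PySem.Dict.empty
  let slice_dict := my_list.foldl (fun sd v => sd.insert v (counts.getD v 0)) PySem.Dict.empty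
  ("Primary ID", "Slice count", slice_dict.items)

-- ===== PRECONDITION & SPEC =====
-- Pre_: every value of the dict has length ≥ 3; otherwise Python A raises IndexError on val[2].
def Pre_get_slice_counts (out_dict : List (String × List Int)) : Prop :=
  ∀ v ∈ (PySem.Dict.ofList out_dict).values, 3 ≤ v.length
instance (out_dict : List (String × List Int)) : Decidable (Pre_get_slice_counts out_dict) := by unfold Pre_get_slice_counts; infer_instance

def pvWitness_get_slice_counts : (List (String × List Int)) := [("svc1", [1, 2, 3]), ("svc2", [4, 5, 3]), ("svc3", [6, 7, 8])]

def Spec_get_slice_counts (out_dict : List (String × List Int)) (out : String × String × (List (Int × Int))) : Prop := out = get_slice_counts_alt out_dict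
instance (out_dict : List (String × List Int)) (out : String × String × (List (Int × Int))) : Decidable (Spec_get_slice_counts out_dict out) := by unfold Spec_get_slice_counts; infer_instance

-- ===== CLAIM (what is proved, stated in full; the proofs are below) =====
def Claim_equal_get_slice_counts : Prop := ∀ (out_dict : List (String × List Int)), Dom_get_slice_counts out_dict → Pre_get_slice_counts out_dict → Spec_get_slice_counts out_dict (get_slice_counts out_dict)

-- ===== LEMMAS AND PROOFS =====

-- decoder used only to prove str(n) injective on Int
def pvDec (a : Nat) (cs : List Char) : Nat := cs.foldl (fun a c => a * 10 + (c.toNat - 48)) a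

def pvDecInt (cs : List Char) : Int :=
  match cs with
  | [] => 0
  | c :: rest => if c = '-' then -((pvDec 0 rest : Nat) : Int) else ((pvDec 0 cs : Nat) : Int)

lemma pvDigitChar_toNat (k : Nat) (hk : k < 10) : (Nat.digitChar k).toNat = k + 48 := by
  interval_cases k <;> decide

lemma pvDec_toDigitsCore : ∀ (f n : Nat) (l : List Char), n < 10 ^ f →
    pvDec 0 (Nat.toDigitsCore 10 f n l) = pvDec n l := by
  intro f
  induction f with
  | zero =>
    intro n l hn
    have : n = 0 := by omega
    subst this
    rfl
  | succ f ih =>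
    intro n l hn
    show pvDec 0 (Nat.toDigitsCore 10 (f + 1) n l) = pvDec n l
    rw [Nat.toDigitsCore]
    by_cases h : n / 10 = 0
    · have hn10 : n < 10 := by omega
      simp only [h, if_pos]
      show pvDec 0 (Nat.digitChar (n % 10) :: l) = pvDec n l
      have hm : n % 10 = n := Nat.mod_eq_of_lt hn10
      simp only [pvDec, List.foldl_cons, pvDigitChar_toNat (n % 10) (Nat.mod_lt _ (by omega))]
      rw [hm]
      simp
    · simp only [h, reduceIte]
      have hlt : n / 10 < 10 ^ f := by
        have h10 : n < 10 * 10 ^ f := by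
          calc n < 10 ^ (f + 1) := hn
          _ = 10 * 10 ^ f := by ring
        exact Nat.div_lt_of_lt_mul h10
      rw [ih (n / 10) (Nat.digitChar (n % 10) :: l) hlt]
      simp only [pvDec, List.foldl_cons, pvDigitChar_toNat (n % 10) (Nat.mod_lt _ (by omega))]
      congr 1
      omega

lemma pvDec_toDigits (m : Nat) : pvDec 0 (Nat.toDigits 10 m) = m := by
  have h : m < 10 ^ (m + 1) := by
    calc m < 10 ^ m := Nat.lt_pow_self (by omega)
    _ ≤ 10 ^ (m + 1) := Nat.pow_le_pow_right (by omega) (Nat.le_succ m)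
  simpa [pvDec] using pvDec_toDigitsCore (m + 1) m [] h

lemma pvToDigitsCore_head : ∀ (f n : Nat) (l : List Char), 0 < f →
    ∃ k cs, k < 10 ∧ Nat.toDigitsCore 10 f n l = Nat.digitChar k :: cs := by
  intro f
  induction f with
  | zero => intro n l h; omega
  | succ f ih =>
    intro n l _
    rw [Nat.toDigitsCore]
    by_cases h : n / 10 = 0
    · exact ⟨n % 10, l, Nat.mod_lt _ (by omega), by simp [h]⟩
    · simp only [h, reduceIte]
      rcases Nat.eq_zero_or_pos f with hf | hf
      · subst hf
        exact ⟨n % 10, l, Nat.mod_lt _ (by omega), rfl⟩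
      · exact ih (n / 10) (Nat.digitChar (n % 10) :: l) hf

lemma pvToDigits_head (m : Nat) : ∃ k cs, k < 10 ∧ Nat.toDigits 10 m = Nat.digitChar k :: cs :=
  pvToDigitsCore_head (m + 1) m [] (by omega)

lemma pvDigitChar_ne_dash (k : Nat) (hk : k < 10) : Nat.digitChar k ≠ '-' := by
  interval_cases k <;> decide

lemma pvDecInt_toChars (n : Int) : pvDecInt (PySem.Int.toChars n) = n := by
  by_cases hn : n < 0
  · simp only [PySem.Int.toChars, hn, reduceIte]
    show pvDecInt ('-' :: Nat.toDigits 10 n.natAbs) = n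
    simp only [pvDecInt, reduceIte, pvDec_toDigits]
    omega
  · simp only [PySem.Int.toChars, hn, reduceIte]
    obtain ⟨k, cs, hk, heq⟩ := pvToDigits_head n.toNat
    rw [heq]
    simp only [pvDecInt, pvDigitChar_ne_dash k hk, reduceIte, ← heq, pvDec_toDigits]
    omega

lemma pvToStr_inj {a b : Int} (h : PySem.Int.toStr a = PySem.Int.toStr b) : a = b := by
  have h2 : PySem.Int.toChars a = PySem.Int.toChars b := by
    rw [← PySem.Int.toList_toStr, ← PySem.Int.toList_toStr, h]
  have := congrArg pvDecInt h2
  rwa [pvDecInt_toChars, pvDecInt_toChars] at this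

lemma pvCount_eq (vals : List (List Int)) (p : Int) :
    ((List.countP (fun val => PySem.Int.toStr p == PySem.Int.toStr (PySem.List.pyGetD val 2 0)) vals : Nat) : Int)
      = ((vals.map (fun val => PySem.List.pyGetD val 2 0)).count p : Int) := by
  rw [List.count, List.countP_map]
  congr 1
  apply List.countP_congr
  intro val _
  simp only [Function.comp, beq_iff_eq]
  constructor
  · intro h; exact (pvToStr_inj h).symm
  · intro h; rw [h]

-- ===== VERDICT (by name: the statement is the Claim_ definition above) =====
theorem get_slice_counts_spec : Claim_equal_get_slice_counts := by
  intro out_dict _ _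
  show get_slice_counts out_dict = get_slice_counts_alt out_dict
  unfold get_slice_counts get_slice_counts_alt
  simp only [PySem.List.foldl_append_singleton_eq_map, List.nil_append,
    PySem.List.foldl_count_if, PySem.Dict.foldl_insert_getD_add_one_eq_counter,
    PySem.Dict.getD_counter, pvCount_eq, zero_add]
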